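-- pv_equiv track=rewrite | github.com/leommxj/sysctl-list | tools/extract/source_scan.py | slice_delimited_block
-- ===== SOURCE A (Python) =====
-- def slice_delimited_block(text: str, start: int, open_char: str, close_char: str) -> tuple[str, int]:
--     depth = 0
--     index = start
--     in_string = False
--     in_char = False
--     in_line_comment = False
--     in_block_comment = False
--
--     while index < len(text):
--         char = text[index]
--         next_char = text[index + 1] if index + 1 < len(text) else ""
--         if in_line_comment:
--             if char == "\n":
--                 in_line_comment = False
--             index += 1
--             continue
--         if in_block_comment:
--             if char == "*" and next_char == "/":
--                 in_block_comment = False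
--                 index += 2
--                 continue
--             index += 1
--             continue
--         if in_string:
--             if char == "\\":
--                 index += 2
--                 continue
--             if char == '"':
--                 in_string = False
--             index += 1
--             continue
--         if in_char:
--             if char == "\\":
--                 index += 2
--                 continue
--             if char == "'":
--                 in_char = False
--             index += 1
--             continue
--         if char == "/" and next_char == "/":
--             in_line_comment = True
--             index += 2
--             continue
--         if char == "/" and next_char == "*":
--             in_block_comment = True
--             index += 2
--             continue
--         if char == '"':
--             in_string = True
--             index += 1
--             continue
--         if char == "'":
--             in_char = True
--             index += 1
--             continue
--         if char == open_char:
--             depth += 1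
--         elif char == close_char:
--             depth -= 1
--             if depth == 0:
--                 return text[start + 1 : index], index + 1
--         index += 1
--     return text[start + 1 :], len(text)
-- ===== SOURCE B (Python) =====
-- def _skip_line_comment(text, i):
--     # advance past a // comment body: consume up to and including the newline
--     n = len(text)
--     while i < n:
--         if text[i] == "\n":
--             return i + 1
--         i += 1
--     return i
--
--
-- def _skip_block_comment(text, i):
--     # advance past a /* comment body: consume up to and including the closing */
--     n = len(text)
--     while i < n:
--         if text[i] == "*" and i + 1 < n and text[i + 1] == "/":
--             return i + 2
--         i += 1
--     return i
--
--
-- def _skip_quoted(text, i, quote):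
--     # advance past a quoted literal body: backslash skips two, closing quote ends
--     n = len(text)
--     while i < n:
--         c = text[i]
--         if c == "\\":
--             i += 2
--         elif c == quote:
--             return i + 1
--         else:
--             i += 1
--     return i
--
--
-- def _delimiter_events(text, start, open_char, close_char):
--     # Pass 1 (tokenizer): the complete list of code-context delimiter
--     # occurrences from `start`, as (index, +1) for open_char and (index, -1)
--     # for close_char; strings and comments are skipped and emit nothing.
--     events = []
--     n = len(text)
--     i = start
--     while i < n:
--         c = text[i]
--         nc = text[i + 1] if i + 1 < n else ""
--         if c == "/" and nc == "/":
--             i = _skip_line_comment(text, i + 2)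
--         elif c == "/" and nc == "*":
--             i = _skip_block_comment(text, i + 2)
--         elif c == '"':
--             i = _skip_quoted(text, i + 1, '"')
--         elif c == "'":
--             i = _skip_quoted(text, i + 1, "'")
--         else:
--             if c == open_char:
--                 events.append((i, 1))
--             elif c == close_char:
--                 events.append((i, -1))
--             i += 1
--     return events
--
--
-- def slice_delimited_block(text: str, start: int, open_char: str, close_char: str) -> tuple[str, int]:
--     # Pass 2: fold the depth over the event list; the block ends at the first
--     # close event whose running depth reaches zero.
--     depth = 0
--     for index, step in _delimiter_events(text, start, open_char, close_char):
--         depth += step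
--         if step == -1 and depth == 0:
--             return text[start + 1 : index], index + 1
--     return text[start + 1 :], len(text)
-- ===== Notes on version B (the rewrite author's own statement) =====
-- stated objective: alternative
-- what changed: A's single flag-driven scan that interleaves depth counting, string/comment skipping and the early return is replaced by two staged passes: a tokenizer that materializes the explicit list of code-context delimiter events (index, +1/-1), then a separate fold of the depth over that event list to locate the balancing close.
import Mathlib
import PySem

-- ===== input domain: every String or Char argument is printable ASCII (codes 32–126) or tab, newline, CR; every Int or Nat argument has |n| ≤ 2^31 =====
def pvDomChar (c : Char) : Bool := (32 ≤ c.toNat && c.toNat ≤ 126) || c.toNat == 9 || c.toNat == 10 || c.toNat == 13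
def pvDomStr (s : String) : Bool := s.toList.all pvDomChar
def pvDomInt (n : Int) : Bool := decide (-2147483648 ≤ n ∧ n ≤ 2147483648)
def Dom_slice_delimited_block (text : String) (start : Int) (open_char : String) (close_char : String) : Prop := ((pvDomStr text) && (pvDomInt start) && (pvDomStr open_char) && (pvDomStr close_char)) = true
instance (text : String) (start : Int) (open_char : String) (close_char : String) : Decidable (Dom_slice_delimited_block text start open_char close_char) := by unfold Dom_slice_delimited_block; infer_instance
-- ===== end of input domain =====

-- B is staged: a first pass tokenizes the text into the explicit list of code-context
-- delimiter events (index, ±1), a second pass folds depth over that list; A interleaves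
-- depth counting and skipping in one flag-driven scan (alternative decomposition, same cost).
-- The Nat fuel argument of each loop is only a totality guard; the initial fuel is
-- always large enough that it never runs out.

-- ===== PORT A =====
-- next_char: text[index+1] if in range else "" (shared accessor, used by both ports)
def pvNext (t : List Char) (i : Int) : Option Char :=
  if i + 1 < (t.length : Int) then PySem.List.pyGet? t (i + 1) else none

-- A's single while loop: one state machine with flags in_string/in_char/in_line_comment/in_block_comment.
def pvALoop (t : List Char) (start : Int) (ocl ccl : List Char) :
    Nat → Int → Int → Bool → Bool → Bool → Bool → String × Int
  | 0, _depth, _index, _instr, _inchar, _inlc, _inbc =>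
    (String.ofList (PySem.List.slice t (some (start + 1)) none), (t.length : Int))
  | fuel + 1, depth, index, instr, inchar, inlc, inbc =>
    if index < (t.length : Int) then
      match PySem.List.pyGet? t index with
      | none =>
        -- unreachable for index ≥ -len (Pre_); Python would raise IndexError here
        (String.ofList (PySem.List.slice t (some (start + 1)) none), (t.length : Int))
      | some c =>
        if inlc then
          pvALoop t start ocl ccl fuel depth (index + 1) instr inchar (c != '\n') inbc
        else if inbc then
          if c == '*' && pvNext t index == some '/' then
            pvALoop t start ocl ccl fuel depth (index + 2) instr inchar inlc false
          else
            pvALoop t start ocl ccl fuel depth (index + 1) instr inchar inlc inbc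
        else if instr then
          if c == '\\' then
            pvALoop t start ocl ccl fuel depth (index + 2) instr inchar inlc inbc
          else
            pvALoop t start ocl ccl fuel depth (index + 1) (c != '"') inchar inlc inbc
        else if inchar then
          if c == '\\' then
            pvALoop t start ocl ccl fuel depth (index + 2) instr inchar inlc inbc
          else
            pvALoop t start ocl ccl fuel depth (index + 1) instr (c != '\'') inlc inbc
        else if c == '/' && pvNext t index == some '/' then
          pvALoop t start ocl ccl fuel depth (index + 2) instr inchar true inbc
        else if c == '/' && pvNext t index == some '*' then
          pvALoop t start ocl ccl fuel depth (index + 2) instr inchar inlc true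
        else if c == '"' then
          pvALoop t start ocl ccl fuel depth (index + 1) true inchar inlc inbc
        else if c == '\'' then
          pvALoop t start ocl ccl fuel depth (index + 1) instr true inlc inbc
        else if [c] == ocl then
          pvALoop t start ocl ccl fuel (depth + 1) (index + 1) instr inchar inlc inbc
        else if [c] == ccl then
          if depth - 1 == 0 then
            (String.ofList (PySem.List.slice t (some (start + 1)) (some index)), index + 1)
          else
            pvALoop t start ocl ccl fuel (depth - 1) (index + 1) instr inchar inlc inbc
        else
          pvALoop t start ocl ccl fuel depth (index + 1) instr inchar inlc inbc
    else
      (String.ofList (PySem.List.slice t (some (start + 1)) none), (t.length : Int))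

def slice_delimited_block (text : String) (start : Int) (open_char : String) (close_char : String) : String × Int :=
  pvALoop text.toList start open_char.toList close_char.toList
    (((text.toList.length : Int) - start).toNat + 1) 0 start false false false false

-- ===== PORT B =====
-- B's sub-scanners: each advances the index past one string/comment and returns the new index.
def pvSkipLine (t : List Char) : Nat → Int → Int
  | 0, i => i
  | fuel + 1, i =>
    if i < (t.length : Int) then
      match PySem.List.pyGet? t i with
      | none => i  -- unreachable for i ≥ -len
      | some c => if c == '\n' then i + 1 else pvSkipLine t fuel (i + 1)
    else i

def pvSkipBlock (t : List Char) : Nat → Int → Int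
  | 0, i => i
  | fuel + 1, i =>
    if i < (t.length : Int) then
      match PySem.List.pyGet? t i with
      | none => i  -- unreachable for i ≥ -len
      | some c =>
        if c == '*' && pvNext t i == some '/' then
          i + 2
        else pvSkipBlock t fuel (i + 1)
    else i

def pvSkipQuoted (t : List Char) : Nat → Int → Char → Int
  | 0, i, _q => i
  | fuel + 1, i, q =>
    if i < (t.length : Int) then
      match PySem.List.pyGet? t i with
      | none => i  -- unreachable for i ≥ -len
      | some c =>
        if c == '\\' then pvSkipQuoted t fuel (i + 2) q
        else if c == q then i + 1
        else pvSkipQuoted t fuel (i + 1) q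
    else i

-- B pass 1: the complete list of code-context delimiter events (index, +1 / -1);
-- strings and comments are skipped by the sub-scanners (each called with fresh fuel) and emit nothing.
def pvEvents (t : List Char) (ocl ccl : List Char) : Nat → Int → List (Int × Int)
  | 0, _i => []
  | fuel + 1, i =>
    if i < (t.length : Int) then
      match PySem.List.pyGet? t i with
      | none => []  -- unreachable for i ≥ -len (Pre_); Python would raise IndexError here
      | some c =>
        if c == '/' && pvNext t i == some '/' then
          pvEvents t ocl ccl fuel (pvSkipLine t (((t.length : Int) - (i + 2)).toNat + 1) (i + 2))
        else if c == '/' && pvNext t i == some '*' then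
          pvEvents t ocl ccl fuel (pvSkipBlock t (((t.length : Int) - (i + 2)).toNat + 1) (i + 2))
        else if c == '"' then
          pvEvents t ocl ccl fuel (pvSkipQuoted t (((t.length : Int) - (i + 1)).toNat + 1) (i + 1) '"')
        else if c == '\'' then
          pvEvents t ocl ccl fuel (pvSkipQuoted t (((t.length : Int) - (i + 1)).toNat + 1) (i + 1) '\'')
        else if [c] == ocl then
          (i, 1) :: pvEvents t ocl ccl fuel (i + 1)
        else if [c] == ccl then
          (i, -1) :: pvEvents t ocl ccl fuel (i + 1)
        else
          pvEvents t ocl ccl fuel (i + 1)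
    else []

-- B pass 2: fold the depth over the event list; the block ends at the first close event
-- whose running depth reaches zero.
def pvFold (t : List Char) (start : Int) : Int → List (Int × Int) → String × Int
  | _depth, [] => (String.ofList (PySem.List.slice t (some (start + 1)) none), (t.length : Int))
  | depth, (idx, step) :: rest =>
    if step == -1 && depth + step == 0 then
      (String.ofList (PySem.List.slice t (some (start + 1)) (some idx)), idx + 1)
    else
      pvFold t start (depth + step) rest

def slice_delimited_block_alt (text : String) (start : Int) (open_char : String) (close_char : String) : String × Int :=
  pvFold text.toList start 0
    (pvEvents text.toList open_char.toList close_char.toList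
      (((text.toList.length : Int) - start).toNat + 1) start)

-- ===== PRECONDITION & SPEC =====
-- Pre_ excludes exactly the inputs where A raises IndexError: start below -len(text)
-- makes the first text[index] access raise.
def Pre_slice_delimited_block (text : String) (start : Int) (open_char : String) (close_char : String) : Prop :=
  -(text.toList.length : Int) ≤ start
instance (text : String) (start : Int) (open_char : String) (close_char : String) : Decidable (Pre_slice_delimited_block text start open_char close_char) := by unfold Pre_slice_delimited_block; infer_instance

def pvWitness_slice_delimited_block : String × Int × String × String := ("x{a\"}\"/*}*/ }b", 1, "{", "}")

def Spec_slice_delimited_block (text : String) (start : Int) (open_char : String) (close_char : String) (out : String × Int) : Prop := out = slice_delimited_block_alt text start open_char close_char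
instance (text : String) (start : Int) (open_char : String) (close_char : String) (out : String × Int) : Decidable (Spec_slice_delimited_block text start open_char close_char out) := by unfold Spec_slice_delimited_block; infer_instance

-- ===== CLAIM (what is proved, stated in full; the proofs are below) =====
def Claim_equal_slice_delimited_block : Prop := ∀ (text : String) (start : Int) (open_char : String) (close_char : String), Dom_slice_delimited_block text start open_char close_char → Pre_slice_delimited_block text start open_char close_char → Spec_slice_delimited_block text start open_char close_char (slice_delimited_block text start open_char close_char)

-- ===== LEMMAS AND PROOFS =====

theorem pvGet_some (t : List Char) (i : Int) (h1 : -(t.length : Int) ≤ i) (h2 : i < (t.length : Int)) :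
    ∃ c, PySem.List.pyGet? t i = some c := by
  cases hg : PySem.List.pyGet? t i with
  | some c => exact ⟨c, rfl⟩
  | none =>
    rw [PySem.List.pyGet?_eq_none_iff] at hg
    exact absurd (by simp [PySem.Raise.InRange]; omega) hg

-- each sub-scanner only moves the index forward
theorem pvSkipLine_ge (t : List Char) (fuel : Nat) (i : Int) : i ≤ pvSkipLine t fuel i := by
  induction fuel generalizing i with
  | zero => simp [pvSkipLine]
  | succ f ih =>
    rw [pvSkipLine]
    repeat' split
    all_goals first | omega | (have := ih (i + 1); omega)

theorem pvSkipBlock_ge (t : List Char) (fuel : Nat) (i : Int) : i ≤ pvSkipBlock t fuel i := by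
  induction fuel generalizing i with
  | zero => simp [pvSkipBlock]
  | succ f ih =>
    rw [pvSkipBlock]
    repeat' split
    all_goals first | omega | (have := ih (i + 1); omega)

theorem pvSkipQuoted_ge (t : List Char) (fuel : Nat) (i : Int) (q : Char) : i ≤ pvSkipQuoted t fuel i q := by
  induction fuel generalizing i with
  | zero => simp [pvSkipQuoted]
  | succ f ih =>
    rw [pvSkipQuoted]
    repeat' split
    all_goals first | omega | (have := ih (i + 1); omega) | (have := ih (i + 2); omega)

-- with enough fuel the sub-scanners do not depend on the fuel
theorem pvSkipLine_irrel (t : List Char) (f1 f2 : Nat) (i : Int)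
    (h1 : ((t.length : Int) - i).toNat < f1) (h2 : ((t.length : Int) - i).toNat < f2) :
    pvSkipLine t f1 i = pvSkipLine t f2 i := by
  induction f1 generalizing f2 i with
  | zero => omega
  | succ f ih =>
    cases f2 with
    | zero => omega
    | succ g =>
      rw [pvSkipLine, pvSkipLine]
      repeat' split
      all_goals first | rfl | exact ih g (i + 1) (by omega) (by omega)

theorem pvSkipBlock_irrel (t : List Char) (f1 f2 : Nat) (i : Int)
    (h1 : ((t.length : Int) - i).toNat < f1) (h2 : ((t.length : Int) - i).toNat < f2) :
    pvSkipBlock t f1 i = pvSkipBlock t f2 i := by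
  induction f1 generalizing f2 i with
  | zero => omega
  | succ f ih =>
    cases f2 with
    | zero => omega
    | succ g =>
      rw [pvSkipBlock, pvSkipBlock]
      repeat' split
      all_goals first | rfl | exact ih g (i + 1) (by omega) (by omega)

theorem pvSkipQuoted_irrel (t : List Char) (f1 f2 : Nat) (i : Int) (q : Char)
    (h1 : ((t.length : Int) - i).toNat < f1) (h2 : ((t.length : Int) - i).toNat < f2) :
    pvSkipQuoted t f1 i q = pvSkipQuoted t f2 i q := by
  induction f1 generalizing f2 i with
  | zero => omega
  | succ f ih =>
    cases f2 with
    | zero => omega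
    | succ g =>
      rw [pvSkipQuoted, pvSkipQuoted]
      repeat' split
      all_goals first | rfl | exact ih g (i + 1) (by omega) (by omega) | exact ih g (i + 2) (by omega) (by omega)

-- with enough fuel A's loop does not depend on the fuel
theorem pvALoop_irrel (t : List Char) (start : Int) (ocl ccl : List Char) (f1 f2 : Nat)
    (depth i : Int) (instr inchar inlc inbc : Bool) (h : -(t.length : Int) ≤ i)
    (h1 : ((t.length : Int) - i).toNat < f1) (h2 : ((t.length : Int) - i).toNat < f2) :
    pvALoop t start ocl ccl f1 depth i instr inchar inlc inbc
      = pvALoop t start ocl ccl f2 depth i instr inchar inlc inbc := by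
  induction f1 generalizing f2 depth i instr inchar inlc inbc with
  | zero => omega
  | succ f ih =>
    cases f2 with
    | zero => omega
    | succ g =>
      rw [pvALoop, pvALoop]
      by_cases hlt : i < (t.length : Int)
      · obtain ⟨c, hc⟩ := pvGet_some t i h hlt
        simp only [if_pos hlt, hc]
        have IH : ∀ (depth i : Int) (b1 b2 b3 b4 : Bool), -(t.length : Int) ≤ i →
            ((t.length : Int) - i).toNat < f → ((t.length : Int) - i).toNat < g →
            pvALoop t start ocl ccl f depth i b1 b2 b3 b4 = pvALoop t start ocl ccl g depth i b1 b2 b3 b4 :=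
          fun d j b1 b2 b3 b4 hj hf hg => ih g d j b1 b2 b3 b4 hj hf hg
        by_cases b1 : inlc = true
        · simp only [b1, eq_self_iff_true, if_true, ite_true]
          exact IH _ _ _ _ _ _ (by omega) (by omega) (by omega)
        · simp only [Bool.not_eq_true] at b1
          simp only [b1, Bool.false_eq_true, if_false, ite_false]
          by_cases b2 : inbc = true
          · simp only [b2, eq_self_iff_true, if_true, ite_true]
            by_cases hc1 : (c == '*' && pvNext t i == some '/') = true
            · simp only [hc1, if_true, ite_true]
              exact IH _ _ _ _ _ _ (by omega) (by omega) (by omega)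
            · simp only [Bool.not_eq_true] at hc1
              simp only [hc1, Bool.false_eq_true, if_false, ite_false]
              exact IH _ _ _ _ _ _ (by omega) (by omega) (by omega)
          · simp only [Bool.not_eq_true] at b2
            simp only [b2, Bool.false_eq_true, if_false, ite_false]
            by_cases b3 : instr = true
            · simp only [b3, eq_self_iff_true, if_true, ite_true]
              by_cases hc1 : (c == '\\') = true
              · simp only [hc1, if_true, ite_true]
                exact IH _ _ _ _ _ _ (by omega) (by omega) (by omega)
              · simp only [Bool.not_eq_true] at hc1
                simp only [hc1, Bool.false_eq_true, if_false, ite_false]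
                exact IH _ _ _ _ _ _ (by omega) (by omega) (by omega)
            · simp only [Bool.not_eq_true] at b3
              simp only [b3, Bool.false_eq_true, if_false, ite_false]
              by_cases b4 : inchar = true
              · simp only [b4, eq_self_iff_true, if_true, ite_true]
                by_cases hc1 : (c == '\\') = true
                · simp only [hc1, if_true, ite_true]
                  exact IH _ _ _ _ _ _ (by omega) (by omega) (by omega)
                · simp only [Bool.not_eq_true] at hc1
                  simp only [hc1, Bool.false_eq_true, if_false, ite_false]
                  exact IH _ _ _ _ _ _ (by omega) (by omega) (by omega)
              · simp only [Bool.not_eq_true] at b4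
                simp only [b4, Bool.false_eq_true, if_false, ite_false]
                by_cases hc1 : (c == '/' && pvNext t i == some '/') = true
                · simp only [hc1, if_true, ite_true]
                  exact IH _ _ _ _ _ _ (by omega) (by omega) (by omega)
                · simp only [Bool.not_eq_true] at hc1
                  simp only [hc1, Bool.false_eq_true, if_false, ite_false]
                  by_cases hc2 : (c == '/' && pvNext t i == some '*') = true
                  · simp only [hc2, if_true, ite_true]
                    exact IH _ _ _ _ _ _ (by omega) (by omega) (by omega)
                  · simp only [Bool.not_eq_true] at hc2
                    simp only [hc2, Bool.false_eq_true, if_false, ite_false]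
                    by_cases hc3 : (c == '"') = true
                    · simp only [hc3, if_true, ite_true]
                      exact IH _ _ _ _ _ _ (by omega) (by omega) (by omega)
                    · simp only [Bool.not_eq_true] at hc3
                      simp only [hc3, Bool.false_eq_true, if_false, ite_false]
                      by_cases hc4 : (c == '\'') = true
                      · simp only [hc4, if_true, ite_true]
                        exact IH _ _ _ _ _ _ (by omega) (by omega) (by omega)
                      · simp only [Bool.not_eq_true] at hc4
                        simp only [hc4, Bool.false_eq_true, if_false, ite_false]
                        by_cases hc5 : ([c] == ocl) = true
                        · simp only [hc5, if_true, ite_true]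
                          exact IH _ _ _ _ _ _ (by omega) (by omega) (by omega)
                        · simp only [Bool.not_eq_true] at hc5
                          simp only [hc5, Bool.false_eq_true, if_false, ite_false]
                          by_cases hc6 : ([c] == ccl) = true
                          · simp only [hc6, if_true, ite_true]
                            by_cases hc7 : (depth - 1 == 0) = true
                            · simp only [hc7, if_true, ite_true]
                            · simp only [Bool.not_eq_true] at hc7
                              simp only [hc7, Bool.false_eq_true, if_false, ite_false]
                              exact IH _ _ _ _ _ _ (by omega) (by omega) (by omega)
                          · simp only [Bool.not_eq_true] at hc6
                            simp only [hc6, Bool.false_eq_true, if_false, ite_false]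
                            exact IH _ _ _ _ _ _ (by omega) (by omega) (by omega)
      · simp only [if_neg hlt]

-- A in line-comment mode from index i behaves as the normal-mode loop resumed at pvSkipLine t fuel i.
theorem pvA_lc (t : List Char) (start : Int) (ocl ccl : List Char) (fuel : Nat) (depth i : Int)
    (h : -(t.length : Int) ≤ i) (hf : ((t.length : Int) - i).toNat < fuel) :
    pvALoop t start ocl ccl fuel depth i false false true false
      = pvALoop t start ocl ccl fuel depth (pvSkipLine t fuel i) false false false false := by
  cases fuel with
  | zero => omega
  | succ f =>
    rw [pvALoop, pvSkipLine]
    by_cases h2 : i < (t.length : Int)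
    · obtain ⟨c, hc⟩ := pvGet_some t i h h2
      simp only [if_pos h2, hc]
      by_cases hn : c = '\n'
      · subst hn
        simp only [bne_self_eq_false, BEq.rfl, if_true, ite_true]
        exact pvALoop_irrel t start ocl ccl f (f + 1) depth (i + 1) false false false false (by omega) (by omega) (by omega)
      · have hne : (c == '\n') = false := beq_eq_false_iff_ne.mpr hn
        simp only [hne, bne, Bool.not_false, if_true, ite_true, Bool.false_eq_true, if_false, ite_false]
        rw [pvA_lc t start ocl ccl f depth (i + 1) (by omega) (by omega)]
        have hge := pvSkipLine_ge t f (i + 1)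
        exact pvALoop_irrel t start ocl ccl f (f + 1) depth _ false false false false (by omega) (by omega) (by omega)
    · simp only [if_neg h2]
      rw [pvALoop]
      simp [h2]
termination_by fuel
decreasing_by omega

-- A in block-comment mode from index i behaves as the normal-mode loop resumed at pvSkipBlock t fuel i.
theorem pvA_bc (t : List Char) (start : Int) (ocl ccl : List Char) (fuel : Nat) (depth i : Int)
    (h : -(t.length : Int) ≤ i) (hf : ((t.length : Int) - i).toNat < fuel) :
    pvALoop t start ocl ccl fuel depth i false false false true
      = pvALoop t start ocl ccl fuel depth (pvSkipBlock t fuel i) false false false false := by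
  cases fuel with
  | zero => omega
  | succ f =>
    rw [pvALoop, pvSkipBlock]
    by_cases h2 : i < (t.length : Int)
    · obtain ⟨c, hc⟩ := pvGet_some t i h h2
      simp only [if_pos h2, hc, Bool.false_eq_true, if_false, ite_false]
      by_cases hcond : (c == '*' && pvNext t i == some '/') = true
      · simp only [hcond, if_true, ite_true]
        exact pvALoop_irrel t start ocl ccl f (f + 1) depth (i + 2) false false false false (by omega) (by omega) (by omega)
      · simp only [Bool.not_eq_true] at hcond
        simp only [hcond, Bool.false_eq_true, if_false, ite_false]
        rw [pvA_bc t start ocl ccl f depth (i + 1) (by omega) (by omega)]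
        have hge := pvSkipBlock_ge t f (i + 1)
        exact pvALoop_irrel t start ocl ccl f (f + 1) depth _ false false false false (by omega) (by omega) (by omega)
    · simp only [if_neg h2]
      rw [pvALoop]
      simp [h2]
termination_by fuel
decreasing_by omega

-- A in string mode from index i behaves as the normal-mode loop resumed at pvSkipQuoted t fuel i '"'.
theorem pvA_str (t : List Char) (start : Int) (ocl ccl : List Char) (fuel : Nat) (depth i : Int)
    (h : -(t.length : Int) ≤ i) (hf : ((t.length : Int) - i).toNat < fuel) :
    pvALoop t start ocl ccl fuel depth i true false false false
      = pvALoop t start ocl ccl fuel depth (pvSkipQuoted t fuel i '"') false false false false := by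
  cases fuel with
  | zero => omega
  | succ f =>
    rw [pvALoop, pvSkipQuoted]
    by_cases h2 : i < (t.length : Int)
    · obtain ⟨c, hc⟩ := pvGet_some t i h h2
      simp only [if_pos h2, hc, Bool.false_eq_true, if_false, ite_false]
      by_cases hbs : (c == '\\') = true
      · simp only [hbs, if_true, ite_true]
        rw [pvA_str t start ocl ccl f depth (i + 2) (by omega) (by omega)]
        have hge := pvSkipQuoted_ge t f (i + 2) '"'
        exact pvALoop_irrel t start ocl ccl f (f + 1) depth _ false false false false (by omega) (by omega) (by omega)
      · simp only [Bool.not_eq_true] at hbs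
        simp only [hbs, Bool.false_eq_true, if_false, ite_false]
        by_cases hq : (c == '"') = true
        · simp only [hq, if_true, ite_true, bne, Bool.not_true, Bool.false_eq_true, if_false, ite_false]
          exact pvALoop_irrel t start ocl ccl f (f + 1) depth (i + 1) false false false false (by omega) (by omega) (by omega)
        · simp only [Bool.not_eq_true] at hq
          simp only [hq, Bool.false_eq_true, if_false, ite_false, bne, Bool.not_false, if_true, ite_true]
          rw [pvA_str t start ocl ccl f depth (i + 1) (by omega) (by omega)]
          have hge := pvSkipQuoted_ge t f (i + 1) '"'
          exact pvALoop_irrel t start ocl ccl f (f + 1) depth _ false false false false (by omega) (by omega) (by omega)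
    · simp only [if_neg h2]
      rw [pvALoop]
      simp [h2]
termination_by fuel
decreasing_by all_goals omega

-- A in char mode from index i behaves as the normal-mode loop resumed at pvSkipQuoted t fuel i '\''.
theorem pvA_chr (t : List Char) (start : Int) (ocl ccl : List Char) (fuel : Nat) (depth i : Int)
    (h : -(t.length : Int) ≤ i) (hf : ((t.length : Int) - i).toNat < fuel) :
    pvALoop t start ocl ccl fuel depth i false true false false
      = pvALoop t start ocl ccl fuel depth (pvSkipQuoted t fuel i '\'') false false false false := by
  cases fuel with
  | zero => omega
  | succ f =>
    rw [pvALoop, pvSkipQuoted]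
    by_cases h2 : i < (t.length : Int)
    · obtain ⟨c, hc⟩ := pvGet_some t i h h2
      simp only [if_pos h2, hc, Bool.false_eq_true, if_false, ite_false]
      by_cases hbs : (c == '\\') = true
      · simp only [hbs, if_true, ite_true]
        rw [pvA_chr t start ocl ccl f depth (i + 2) (by omega) (by omega)]
        have hge := pvSkipQuoted_ge t f (i + 2) '\''
        exact pvALoop_irrel t start ocl ccl f (f + 1) depth _ false false false false (by omega) (by omega) (by omega)
      · simp only [Bool.not_eq_true] at hbs
        simp only [hbs, Bool.false_eq_true, if_false, ite_false]
        by_cases hq : (c == '\'') = true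
        · simp only [hq, if_true, ite_true, bne, Bool.not_true, Bool.false_eq_true, if_false, ite_false]
          exact pvALoop_irrel t start ocl ccl f (f + 1) depth (i + 1) false false false false (by omega) (by omega) (by omega)
        · simp only [Bool.not_eq_true] at hq
          simp only [hq, Bool.false_eq_true, if_false, ite_false, bne, Bool.not_false, if_true, ite_true]
          rw [pvA_chr t start ocl ccl f depth (i + 1) (by omega) (by omega)]
          have hge := pvSkipQuoted_ge t f (i + 1) '\''
          exact pvALoop_irrel t start ocl ccl f (f + 1) depth _ false false false false (by omega) (by omega) (by omega)
    · simp only [if_neg h2]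
      rw [pvALoop]
      simp [h2]
termination_by fuel
decreasing_by all_goals omega

-- main invariant: A's normal-mode loop equals folding the depth over B's event list
theorem pvMain (t : List Char) (start : Int) (ocl ccl : List Char) (fuel : Nat) (depth i : Int)
    (h : -(t.length : Int) ≤ i) (hf : ((t.length : Int) - i).toNat < fuel) :
    pvALoop t start ocl ccl fuel depth i false false false false
      = pvFold t start depth (pvEvents t ocl ccl fuel i) := by
  induction fuel generalizing depth i with
  | zero => omega
  | succ f ih =>
    rw [pvALoop, pvEvents]
    by_cases h2 : i < (t.length : Int)
    · obtain ⟨c, hc⟩ := pvGet_some t i h h2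
      simp only [if_pos h2, hc, Bool.false_eq_true, if_false, ite_false]
      by_cases hlc : (c == '/' && pvNext t i == some '/') = true
      · simp only [hlc, if_true, ite_true]
        rw [pvA_lc t start ocl ccl f depth (i + 2) (by omega) (by omega)]
        have hge := pvSkipLine_ge t f (i + 2)
        rw [pvSkipLine_irrel t f (((t.length : Int) - (i + 2)).toNat + 1) (i + 2) (by omega) (by omega)]
        have hge2 := pvSkipLine_ge t (((t.length : Int) - (i + 2)).toNat + 1) (i + 2)
        exact ih depth _ (by omega) (by omega)
      · simp only [Bool.not_eq_true] at hlc
        simp only [hlc, Bool.false_eq_true, if_false, ite_false]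
        by_cases hbc : (c == '/' && pvNext t i == some '*') = true
        · simp only [hbc, if_true, ite_true]
          rw [pvA_bc t start ocl ccl f depth (i + 2) (by omega) (by omega)]
          have hge := pvSkipBlock_ge t f (i + 2)
          rw [pvSkipBlock_irrel t f (((t.length : Int) - (i + 2)).toNat + 1) (i + 2) (by omega) (by omega)]
          have hge2 := pvSkipBlock_ge t (((t.length : Int) - (i + 2)).toNat + 1) (i + 2)
          exact ih depth _ (by omega) (by omega)
        · simp only [Bool.not_eq_true] at hbc
          simp only [hbc, Bool.false_eq_true, if_false, ite_false]
          by_cases hs : (c == '"') = true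
          · simp only [hs, if_true, ite_true]
            rw [pvA_str t start ocl ccl f depth (i + 1) (by omega) (by omega)]
            have hge := pvSkipQuoted_ge t f (i + 1) '"'
            rw [pvSkipQuoted_irrel t f (((t.length : Int) - (i + 1)).toNat + 1) (i + 1) '"' (by omega) (by omega)]
            have hge2 := pvSkipQuoted_ge t (((t.length : Int) - (i + 1)).toNat + 1) (i + 1) '"'
            exact ih depth _ (by omega) (by omega)
          · simp only [Bool.not_eq_true] at hs
            simp only [hs, Bool.false_eq_true, if_false, ite_false]
            by_cases hch : (c == '\'') = true
            · simp only [hch, if_true, ite_true]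
              rw [pvA_chr t start ocl ccl f depth (i + 1) (by omega) (by omega)]
              have hge := pvSkipQuoted_ge t f (i + 1) '\''
              rw [pvSkipQuoted_irrel t f (((t.length : Int) - (i + 1)).toNat + 1) (i + 1) '\'' (by omega) (by omega)]
              have hge2 := pvSkipQuoted_ge t (((t.length : Int) - (i + 1)).toNat + 1) (i + 1) '\''
              exact ih depth _ (by omega) (by omega)
            · simp only [Bool.not_eq_true] at hch
              simp only [hch, Bool.false_eq_true, if_false, ite_false]
              by_cases hoc : ([c] == ocl) = true
              · simp only [hoc, if_true, ite_true]
                rw [pvFold]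
                have hstep : ((1 : Int) == -1) = false := by decide
                simp only [hstep, Bool.false_and, Bool.false_eq_true, if_false, ite_false]
                exact ih (depth + 1) (i + 1) (by omega) (by omega)
              · simp only [Bool.not_eq_true] at hoc
                simp only [hoc, Bool.false_eq_true, if_false, ite_false]
                by_cases hcc : ([c] == ccl) = true
                · simp only [hcc, if_true, ite_true]
                  rw [pvFold]
                  have hstep : ((-1 : Int) == -1) = true := by decide
                  simp only [hstep, Bool.true_and]
                  by_cases hd : (depth - 1 == 0) = true
                  · have hd' : (depth + -1 == 0) = true := by
                      simp only [beq_iff_eq] at hd ⊢; omega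
                    simp only [hd, hd', if_true, ite_true]
                  · simp only [Bool.not_eq_true] at hd
                    have hd' : (depth + -1 == 0) = false := by
                      simp only [beq_eq_false_iff_ne, ne_eq] at hd ⊢; omega
                    simp only [hd, hd', Bool.false_eq_true, if_false, ite_false]
                    have : depth + -1 = depth - 1 := by omega
                    rw [this]
                    exact ih (depth - 1) (i + 1) (by omega) (by omega)
                · simp only [Bool.not_eq_true] at hcc
                  simp only [hcc, Bool.false_eq_true, if_false, ite_false]
                  exact ih depth (i + 1) (by omega) (by omega)
    · simp [pvFold, h2]

-- ===== VERDICT (by name: the statement is the Claim_ definition above) =====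
theorem slice_delimited_block_spec : Claim_equal_slice_delimited_block := by
  intro text start oc cc _hdom hpre
  unfold Spec_slice_delimited_block slice_delimited_block slice_delimited_block_alt
  exact pvMain _ _ _ _ _ _ _ hpre (by omega)
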